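-- pv_equiv track=rewrite | github.com/daniel-reich/ubiquitous-fiesta | 9fbbjaLt22Zfvjjau_8.py | paul_cipher
-- ===== SOURCE A (Python) =====
-- def paul_cipher(txt):
--   diff, res = 0, ''
--   for c in txt.upper():
--     if c.isalpha():
--       n = (ord(c)-64 + diff)%26
--       diff = ord(c)-64
--       c = 'Z' if not n else chr(n+64)
--     res += c
--   return res
-- ===== SOURCE B (Python) =====
-- def paul_cipher(txt):
--   up = txt.upper()
--   vals = [ord(c) - 64 for c in up if c.isalpha()]
--   preds = [0] + vals[:-1]
--   letters = ['Z' if (v + p) % 26 == 0 else chr((v + p) % 26 + 64)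
--              for v, p in zip(vals, preds)]
--   it = iter(letters)
--   return ''.join(next(it) if c.isalpha() else c for c in up)
-- ===== Notes on version B (the rewrite author's own statement) =====
-- stated objective: alternative
-- what changed: A's single stateful pass carrying the previous letter value across characters is replaced by a two-pass decomposition: extract letter values, zip each with the shifted predecessor list [0]+values[:-1] to transform, then a second pass re-emits transformed letters at alpha positions and copies other characters.
import Mathlib
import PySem

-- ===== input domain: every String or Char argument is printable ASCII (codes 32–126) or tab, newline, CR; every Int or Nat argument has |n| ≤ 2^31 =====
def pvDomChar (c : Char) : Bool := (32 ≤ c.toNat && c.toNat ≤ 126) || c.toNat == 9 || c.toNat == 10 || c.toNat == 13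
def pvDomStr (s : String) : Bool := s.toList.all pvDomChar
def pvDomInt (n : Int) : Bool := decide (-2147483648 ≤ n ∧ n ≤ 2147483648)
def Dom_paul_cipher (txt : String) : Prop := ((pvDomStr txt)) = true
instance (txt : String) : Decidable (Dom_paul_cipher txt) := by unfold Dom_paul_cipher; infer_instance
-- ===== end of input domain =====

-- B replaces A's single stateful pass (running `diff`) by a two-pass decomposition:
-- letter values zipped with their shifted predecessor list, then a re-emission pass
-- (objective: alternative; same linear cost).

-- ===== PORT A =====
-- A's loop: state (diff, res), one step per character of txt.upper().
def pvStepA (st : Int × List Char) (c : Char) : Int × List Char :=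
  if PySem.Chars.isalpha c then
    let n := PySem.Int.mod ((c.toNat : Int) - 64 + st.1) 26
    ((c.toNat : Int) - 64, st.2 ++ [if n = 0 then 'Z' else Char.ofNat (n + 64).toNat])
  else
    (st.1, st.2 ++ [c])

def paul_cipher (txt : String) : String :=
  String.ofList (((PySem.Chars.upper txt.toList).foldl pvStepA (0, [])).2)

-- ===== PORT B =====
-- 'Z' if (v+p)%26==0 else chr((v+p)%26+64)
def pvTransform (vp : Int × Int) : Char :=
  let m := PySem.Int.mod (vp.1 + vp.2) 26
  if m = 0 then 'Z' else Char.ofNat (m + 64).toNat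

-- second pass: emit next transformed letter at each alpha position, copy the rest
def pvEmit : List Char → List Char → List Char
  | [], _ => []
  | c :: cs, ls =>
    if PySem.Chars.isalpha c then
      match ls with
      | [] => []          -- never reached: letters has one entry per alpha char
      | t :: ts => t :: pvEmit cs ts
    else c :: pvEmit cs ls

def paul_cipher_alt (txt : String) : String :=
  let up := PySem.Chars.upper txt.toList
  let vals := (up.filter (fun c => PySem.Chars.isalpha c)).map (fun c => (c.toNat : Int) - 64)
  let preds := 0 :: vals.dropLast
  let letters := (vals.zip preds).map pvTransform
  String.ofList (pvEmit up letters)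

-- ===== PRECONDITION & SPEC =====
def Spec_paul_cipher (txt : String) (out : String) : Prop := out = paul_cipher_alt txt
instance (txt : String) (out : String) : Decidable (Spec_paul_cipher txt out) := by unfold Spec_paul_cipher; infer_instance

-- ===== CLAIM (what is proved, stated in full; the proofs are below) =====
def Claim_equal_paul_cipher : Prop := ∀ (txt : String), Dom_paul_cipher txt → Spec_paul_cipher txt (paul_cipher txt)

-- ===== LEMMAS AND PROOFS =====

-- letters of cs when the value of the previous letter is d
def pvLetters (cs : List Char) (d : Int) : List Char :=
  let vals := (cs.filter (fun c => PySem.Chars.isalpha c)).map (fun c => (c.toNat : Int) - 64)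
  (vals.zip (d :: vals.dropLast)).map pvTransform

theorem pv_zip_shift {α : Type} (vs : List α) (v d : α) :
    (v :: vs).zip (d :: (v :: vs).dropLast) = (v, d) :: vs.zip (v :: vs.dropLast) := by
  cases vs <;> simp [List.dropLast]

theorem pvLetters_cons_alpha (c : Char) (cs : List Char) (d : Int)
    (h : PySem.Chars.isalpha c = true) :
    pvLetters (c :: cs) d =
      pvTransform ((c.toNat : Int) - 64, d) :: pvLetters cs ((c.toNat : Int) - 64) := by
  simp only [pvLetters, List.filter_cons, h, if_pos, List.map_cons]
  rw [pv_zip_shift]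
  simp

theorem pvLetters_cons_nonalpha (c : Char) (cs : List Char) (d : Int)
    (h : PySem.Chars.isalpha c = false) :
    pvLetters (c :: cs) d = pvLetters cs d := by
  simp [pvLetters, h]

theorem pv_main (cs : List Char) : ∀ (d : Int) (res : List Char),
    (cs.foldl pvStepA (d, res)).2 = res ++ pvEmit cs (pvLetters cs d) := by
  induction cs with
  | nil => intro d res; simp [pvEmit]
  | cons c cs ih =>
    intro d res
    by_cases h : PySem.Chars.isalpha c = true
    · rw [pvLetters_cons_alpha c cs d h]
      simp only [List.foldl_cons, pvStepA, h, if_pos, pvEmit, ih]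
      simp [pvTransform]
    · rw [pvLetters_cons_nonalpha c cs d (by simpa using h)]
      simp only [List.foldl_cons, pvStepA, h, pvEmit, ih]
      simp [Bool.not_eq_true] at h
      simp [h]

-- ===== VERDICT (by name: the statement is the Claim_ definition above) =====
theorem paul_cipher_spec : Claim_equal_paul_cipher := by
  intro txt _
  show _ = _
  unfold paul_cipher paul_cipher_alt
  rw [pv_main]
  rfl
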